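-- pv_equiv track=rewrite | github.com/iansoliven/cpkAnalysis | cpkanalysis/postprocess/context.py | _normalise_header_row
-- ===== SOURCE A (Python) =====
-- from typing import Any, Dict, Iterable, List, Optional, Sequence
--
-- def _normalise_header_row(row: Sequence[Any]) -> List[str]:
--     header = []
--     for cell in row:
--         if cell is None:
--             header.append("")
--             continue
--         header.append(str(cell).strip())
--     # Remove trailing empty headers
--     while header and not header[-1]:
--         header.pop()
--     return header
-- ===== SOURCE B (Python) =====
-- def _normalise_header_row(row):
--     result = []
--     pending = 0
--     for cell in row:
--         s = "" if cell is None else str(cell).strip()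
--         if s:
--             result.extend([""] * pending)
--             pending = 0
--             result.append(s)
--         else:
--             pending += 1
--     return result
-- ===== Notes on version B (the rewrite author's own statement) =====
-- stated objective: alternative
-- what changed: Replaces A's normalize-all-then-backward-pop-trailing-empties structure with a single forward pass that defers a run of empty cells in a pending counter and flushes it only when a non-empty cell arrives, so trailing empties are never materialised and no backward scan happens.
import Mathlib
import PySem

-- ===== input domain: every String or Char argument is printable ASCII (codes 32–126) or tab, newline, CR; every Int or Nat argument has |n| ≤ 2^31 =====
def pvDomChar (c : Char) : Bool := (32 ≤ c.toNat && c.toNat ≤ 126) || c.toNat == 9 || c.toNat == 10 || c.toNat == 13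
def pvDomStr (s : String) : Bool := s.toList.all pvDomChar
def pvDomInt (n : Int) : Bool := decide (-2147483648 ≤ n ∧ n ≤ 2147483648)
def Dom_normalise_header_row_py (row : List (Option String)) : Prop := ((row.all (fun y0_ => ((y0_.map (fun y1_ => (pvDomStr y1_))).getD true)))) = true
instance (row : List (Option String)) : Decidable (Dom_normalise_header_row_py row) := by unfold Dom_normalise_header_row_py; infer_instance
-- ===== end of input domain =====

-- B replaces A's normalize-then-backward-pop-trailing loop by one forward pass with a
-- pending counter of uncommitted empty cells (objective: alternative; same O(n) cost).

-- ===== PORT A =====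
-- the 'while header and not header[-1]: header.pop()' loop of A, as recursion on length
def pvPopTrailing (h : List String) : List String :=
  if hne : h ≠ [] ∧ h.getLastD "" = "" then
    pvPopTrailing h.dropLast
  else h
termination_by h.length
decreasing_by
  rcases hne with ⟨hne, _⟩
  have := List.length_pos_of_ne_nil hne
  simp [List.length_dropLast]; omega

def normalise_header_row_py (row : List (Option String)) : List String :=
  let header := row.foldl (fun acc cell =>
    match cell with
    | none => acc ++ [""]
    | some s => acc ++ [PySem.Str.strip s]) []
  pvPopTrailing header

-- ===== PORT B =====
def pvAltGo (result : List String) (pending : Nat) (cells : List (Option String)) : List String :=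
  match cells with
  | [] => result
  | cell :: rest =>
    let s := match cell with | none => "" | some t => PySem.Str.strip t
    if s ≠ "" then pvAltGo (result ++ List.replicate pending "" ++ [s]) 0 rest
    else pvAltGo result (pending + 1) rest

def normalise_header_row_py_alt (row : List (Option String)) : List String :=
  pvAltGo [] 0 row

-- ===== PRECONDITION & SPEC =====
def Spec_normalise_header_row_py (row : List (Option String)) (out : List String) : Prop := out = normalise_header_row_py_alt row
instance (row : List (Option String)) (out : List String) : Decidable (Spec_normalise_header_row_py row out) := by unfold Spec_normalise_header_row_py; infer_instance

-- ===== CLAIM (what is proved, stated in full; the proofs are below) =====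
def Claim_equal_normalise_header_row_py : Prop := ∀ (row : List (Option String)), Dom_normalise_header_row_py row → Spec_normalise_header_row_py row (normalise_header_row_py row)

-- ===== LEMMAS AND PROOFS =====

def pvCell (cell : Option String) : String :=
  match cell with | none => "" | some t => PySem.Str.strip t

theorem pvPopTrailing_nil : pvPopTrailing [] = [] := by
  unfold pvPopTrailing; simp

theorem pvPopTrailing_append_singleton (l : List String) (x : String) :
    pvPopTrailing (l ++ [x]) = if x = "" then pvPopTrailing l else l ++ [x] := by
  rw [pvPopTrailing]
  by_cases hx : x = ""
  · simp [hx]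
  · simp [hx]

theorem pvPopTrailing_replicate (n : Nat) : pvPopTrailing (List.replicate n "") = [] := by
  induction n with
  | zero => simp [pvPopTrailing_nil]
  | succ k ih =>
    have : List.replicate (k + 1) "" = List.replicate k "" ++ [""] := by
      simp [List.replicate_succ']
    rw [this, pvPopTrailing_append_singleton]; simp [ih]

theorem pvPopTrailing_append_cons (l₁ : List String) (s : String) (hs : s ≠ "") (l₂ : List String) :
    pvPopTrailing (l₁ ++ s :: l₂) = l₁ ++ s :: pvPopTrailing l₂ := by
  induction l₂ using List.reverseRecOn with
  | nil => rw [show l₁ ++ [s] = l₁ ++ [s] from rfl, pvPopTrailing_append_singleton]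
           simp [hs, pvPopTrailing_nil]
  | append_singleton l₂' x ih =>
    have h1 : l₁ ++ s :: (l₂' ++ [x]) = (l₁ ++ s :: l₂') ++ [x] := by simp
    rw [h1, pvPopTrailing_append_singleton, pvPopTrailing_append_singleton]
    by_cases hx : x = ""
    · simp [hx, ih]
    · simp [hx]

theorem pvAltGo_eq (cells : List (Option String)) :
    ∀ (result : List String) (pending : Nat),
    pvAltGo result pending cells =
      result ++ pvPopTrailing (List.replicate pending "" ++ cells.map pvCell) := by
  induction cells with
  | nil =>
    intro result pending
    simp [pvAltGo, pvPopTrailing_replicate]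
  | cons cell rest ih =>
    intro result pending
    by_cases hs : pvCell cell = ""
    · have hstep : pvAltGo result pending (cell :: rest) = pvAltGo result (pending + 1) rest := by
        cases cell with
        | none => simp [pvAltGo]
        | some t => simp only [pvCell] at hs; simp [pvAltGo, hs]
      rw [hstep, ih]
      congr 2
      rw [show List.replicate (pending + 1) "" = List.replicate pending "" ++ [""] from by
        simp [List.replicate_succ']]
      rw [show List.map pvCell (cell :: rest) = pvCell cell :: List.map pvCell rest from by simp]
      rw [hs]; simp
    · have hstep : pvAltGo result pending (cell :: rest)
          = pvAltGo (result ++ List.replicate pending "" ++ [pvCell cell]) 0 rest := by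
        cases cell with
        | none => simp [pvCell] at hs
        | some t => simp only [pvCell] at hs ⊢; simp [pvAltGo, hs]
      rw [hstep, ih]
      rw [show List.map pvCell (cell :: rest) = pvCell cell :: List.map pvCell rest from by simp]
      rw [pvPopTrailing_append_cons _ _ hs]
      simp

theorem foldl_header (row : List (Option String)) :
    ∀ acc, row.foldl (fun acc cell =>
      match cell with
      | none => acc ++ [""]
      | some s => acc ++ [PySem.Str.strip s]) acc = acc ++ row.map pvCell := by
  induction row with
  | nil => intro acc; simp
  | cons c rest ih =>
    intro acc
    cases c with
    | none => simp [List.foldl, ih, pvCell]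
    | some s => simp [List.foldl, ih, pvCell]

-- ===== VERDICT (by name: the statement is the Claim_ definition above) =====
theorem normalise_header_row_py_spec : Claim_equal_normalise_header_row_py := by
  intro row _
  unfold Spec_normalise_header_row_py normalise_header_row_py normalise_header_row_py_alt
  rw [pvAltGo_eq, foldl_header]
  simp
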